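-- pv_equiv track=rewrite | github.com/openwenyoo/wenyoo | scripts/wenyoo_launcher.py | split_launcher_args
-- ===== SOURCE A (Python) =====
-- def split_launcher_args(args: list[str]) -> tuple[dict[str, bool], list[str]]:
--     launcher_args = {"setup_only": False, "configure": False}
--     passthrough: list[str] = []
--     for arg in args:
--         if arg == "--setup-only":
--             launcher_args["setup_only"] = True
--         elif arg == "--configure":
--             launcher_args["configure"] = True
--         else:
--             passthrough.append(arg)
--     return launcher_args, passthrough
-- ===== SOURCE B (Python) =====
-- def split_launcher_args(args: list[str]) -> tuple[dict[str, bool], list[str]]: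
--     launcher_args = {
--         "setup_only": "--setup-only" in args,
--         "configure": "--configure" in args,
--     }
--     passthrough = [a for a in args if a not in ("--setup-only", "--configure")]
--     return launcher_args, passthrough
-- ===== Notes on version B (the rewrite author's own statement) =====
-- stated objective: simpler
-- what changed: Replaces the single interleaved loop with stateful elif branches by two whole-list membership tests that compute the flag dict directly plus one comprehension filtering the flag strings out of passthrough.
import Mathlib
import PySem

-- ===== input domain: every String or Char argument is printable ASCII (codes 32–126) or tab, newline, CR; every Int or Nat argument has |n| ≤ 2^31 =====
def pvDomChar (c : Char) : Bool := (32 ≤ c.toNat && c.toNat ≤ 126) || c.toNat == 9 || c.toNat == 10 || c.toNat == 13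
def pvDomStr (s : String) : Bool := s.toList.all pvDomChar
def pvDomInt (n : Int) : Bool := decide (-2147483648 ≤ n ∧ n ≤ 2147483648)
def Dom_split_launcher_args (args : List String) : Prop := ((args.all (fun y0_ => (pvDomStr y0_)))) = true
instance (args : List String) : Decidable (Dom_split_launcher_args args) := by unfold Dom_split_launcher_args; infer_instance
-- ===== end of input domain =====

-- B replaces A's single interleaved loop (elif branches mutating a dict) by two whole-list
-- membership tests for the flags plus one filtering comprehension; objective: simpler.

-- ===== PORT A =====
-- literal port of A: dict initialised to {"setup_only": False, "configure": False},
-- one loop over args with elif branches mutating dict / appending to passthrough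
def split_launcher_args (args : List String) : (List (String × Bool)) × List String :=
  let init : PySem.Dict String Bool :=
    (PySem.Dict.empty.insert "setup_only" false).insert "configure" false
  let st := args.foldl
    (fun (st : PySem.Dict String Bool × List String) arg =>
      if arg == "--setup-only" then (st.1.insert "setup_only" true, st.2)
      else if arg == "--configure" then (st.1.insert "configure" true, st.2)
      else (st.1, st.2 ++ [arg]))
    (init, [])
  (st.1.items, st.2)

-- ===== PORT B =====
-- literal port of B: dict built from two membership tests, passthrough as a filter
def split_launcher_args_alt (args : List String) : (List (String × Bool)) × List String :=
  ([("setup_only", args.contains "--setup-only"),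
    ("configure", args.contains "--configure")],
   args.filter (fun a => !(a == "--setup-only" || a == "--configure")))

-- ===== PRECONDITION & SPEC =====
def Spec_split_launcher_args (args : List String) (out : (List (String × Bool)) × List String) : Prop := out = split_launcher_args_alt args
instance (args : List String) (out : (List (String × Bool)) × List String) : Decidable (Spec_split_launcher_args args out) := by unfold Spec_split_launcher_args; infer_instance

-- ===== CLAIM (what is proved, stated in full; the proofs are below) =====
def Claim_equal_split_launcher_args : Prop := ∀ (args : List String), Dom_split_launcher_args args → Spec_split_launcher_args args (split_launcher_args args)

-- ===== LEMMAS AND PROOFS =====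

-- loop invariant: A's fold from a two-key dict state (s, c) and accumulator acc
lemma split_loop_eq (args : List String) (s c : Bool) (acc : List String) :
    args.foldl
      (fun (st : PySem.Dict String Bool × List String) arg =>
        if arg == "--setup-only" then (st.1.insert "setup_only" true, st.2)
        else if arg == "--configure" then (st.1.insert "configure" true, st.2)
        else (st.1, st.2 ++ [arg]))
      (PySem.Dict.mk [("setup_only", s), ("configure", c)], acc)
    = (PySem.Dict.mk [("setup_only", s || args.contains "--setup-only"),
                      ("configure", c || args.contains "--configure")],
       acc ++ args.filter (fun a => !(a == "--setup-only" || a == "--configure"))) := by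
  induction args generalizing s c acc with
  | nil => simp
  | cons a rest ih =>
    by_cases h1 : a = "--setup-only"
    · subst h1
      simpa [PySem.Dict.insert, PySem.Dict.contains] using ih true c acc
    · by_cases h2 : a = "--configure"
      · subst h2
        simpa [PySem.Dict.insert, PySem.Dict.contains, h1] using ih s true acc
      · simpa [h1, h2, Ne.symm h1, Ne.symm h2] using ih s c (acc ++ [a])

-- ===== VERDICT (by name: the statement is the Claim_ definition above) =====
theorem split_launcher_args_spec : Claim_equal_split_launcher_args := by
  intro args _
  show split_launcher_args args = split_launcher_args_alt args
  unfold split_launcher_args split_launcher_args_alt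
  have hinit : ((PySem.Dict.empty.insert "setup_only" false).insert "configure" false :
      PySem.Dict String Bool) = PySem.Dict.mk [("setup_only", false), ("configure", false)] := by
    decide
  simp only [hinit, split_loop_eq]
  simp
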